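-- pv_equiv track=rewrite | github.com/baileym4/recipes | lab.py | ingredient_mixes
-- ===== SOURCE A (Python) =====
-- def make_grocery_list(flat_recipes):
--     """
--     Given a list of flat_recipe dictionaries that map food items to quantities,
--     return a new overall 'grocery list' dictionary that maps each ingredient name
--     to the sum of its quantities across the given flat recipes.
--
--     For example,
--         make_grocery_list([{'milk':1, 'chocolate':1}, {'sugar':1, 'milk':2}])
--     should return:
--         {'milk':3, 'chocolate': 1, 'sugar': 1}
--     """
--     final = {}
--     for recipe in flat_recipes:
--         for ingredient in recipe:
--             amount = recipe[ingredient]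
--             if ingredient not in final:
--                 final[ingredient] = amount
--             else:
--                 final[ingredient] += amount
--
--     return final
--
-- def ingredient_mixes(flat_recipes):
--     """
--     Given a list of lists of dictionaries, where each inner list represents all
--     the flat recipes for a certain ingredient, compute and return a list of flat
--     recipe dictionaries that represent all the possible combinations of
--     ingredient recipes.
--     """
--     if len(flat_recipes) == 1:
--         return flat_recipes[0]
--     else:
--         final = []
--         possibilities = ingredient_mixes(flat_recipes[1:])
--         # find possibilities of one type with the rest of mixes
--         for option in possibilities:
--             for ingredient in flat_recipes[0]:
--                 final.append(make_grocery_list([option, ingredient]))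
--
--     return final
-- ===== SOURCE B (Python) =====
-- def ingredient_mixes(flat_recipes):
--     combos = [[]]
--     for recipes in reversed(flat_recipes):
--         combos = [combo + [recipe] for combo in combos for recipe in recipes]
--     result = []
--     for combo in combos:
--         merged = {}
--         for recipe in combo:
--             for k, v in recipe.items():
--                 merged[k] = merged.get(k, 0) + v
--         result.append(merged)
--     return result
-- ===== Notes on version B (the rewrite author's own statement) =====
-- stated objective: alternative
-- what changed: Replaces A's right-fold recursion with pairwise re-merging by an iterative Cartesian product over the reversed outer list followed by a single get-and-sum merge per combination.
-- outside the precondition, e.g. on ingredient_mixes([]): A raises RecursionError, B returns [{}]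
import Mathlib
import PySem

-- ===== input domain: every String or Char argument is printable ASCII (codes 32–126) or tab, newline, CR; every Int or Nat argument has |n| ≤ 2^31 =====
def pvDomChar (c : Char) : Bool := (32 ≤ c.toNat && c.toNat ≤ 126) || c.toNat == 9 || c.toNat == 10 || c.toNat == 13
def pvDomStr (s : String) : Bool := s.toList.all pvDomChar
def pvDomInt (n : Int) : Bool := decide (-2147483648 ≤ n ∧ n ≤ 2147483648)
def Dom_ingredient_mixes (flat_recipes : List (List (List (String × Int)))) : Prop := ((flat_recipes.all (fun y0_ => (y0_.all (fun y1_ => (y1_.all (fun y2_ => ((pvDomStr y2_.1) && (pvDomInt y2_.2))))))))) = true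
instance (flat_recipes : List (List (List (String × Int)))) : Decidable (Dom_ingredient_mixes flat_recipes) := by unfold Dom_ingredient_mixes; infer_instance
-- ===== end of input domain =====

-- B replaces A's right-fold recursion with an iterative Cartesian product over the reversed
-- lists plus a single get-and-sum merge per combination (objective: alternative decomposition).


-- ===== PORT A =====
-- helper of A: merge a list of dicts by summing quantities (membership test, then insert or +=)
def make_grocery_list (flat_recipes : List (List (String × Int))) : List (String × Int) :=
  (flat_recipes.foldl
    (fun (final : PySem.Dict String Int) recipe =>
      recipe.foldl
        (fun final kv =>
          if final.contains kv.1 = false then final.insert kv.1 kv.2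
          else final.modify kv.1 0 (· + kv.2))
        final)
    PySem.Dict.empty).items

-- A: recursion on the tail; for each tail possibility, merge it with each head recipe.
-- On [] the Python recurses forever (RecursionError); that input is outside Pre_ below.
def ingredient_mixes : List (List (List (String × Int))) → List (List (String × Int))
  | [] => []
  | [x] => x
  | x :: rest =>
      let possibilities := ingredient_mixes (x :: rest).tail
      possibilities.foldl
        (fun final option =>
          x.foldl (fun final ingredient => final ++ [make_grocery_list [option, ingredient]]) final)
        []

-- ===== PORT B =====
-- helper of B: merged[k] = merged.get(k, 0) + v for each item of one recipe
def pvMergeRecipe (merged : PySem.Dict String Int) (recipe : List (String × Int)) : PySem.Dict String Int :=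
  recipe.foldl (fun merged kv => merged.insert kv.1 (merged.getD kv.1 0 + kv.2)) merged

-- helper of B: iterative Cartesian product over the reversed outer list
def pvCombos (flat_recipes : List (List (List (String × Int)))) : List (List (List (String × Int))) :=
  flat_recipes.reverse.foldl
    (fun combos recipes => combos.flatMap (fun combo => recipes.map (fun recipe => combo ++ [recipe])))
    [[]]

def ingredient_mixes_alt (flat_recipes : List (List (List (String × Int)))) : List (List (String × Int)) :=
  (pvCombos flat_recipes).map
    (fun combo => (combo.foldl pvMergeRecipe PySem.Dict.empty).items)

-- ===== PRECONDITION & SPEC =====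
-- Pre_ excludes [] (the Python A recurses forever there, RecursionError) and requires each inner
-- association list to have pairwise-distinct keys: the inner lists represent Python dicts, whose
-- keys are distinct by construction.
def Pre_ingredient_mixes (flat_recipes : List (List (List (String × Int)))) : Prop :=
  flat_recipes ≠ [] ∧
    ∀ l ∈ flat_recipes, ∀ r ∈ l, (r.map Prod.fst).Nodup
instance (flat_recipes : List (List (List (String × Int)))) : Decidable (Pre_ingredient_mixes flat_recipes) := by unfold Pre_ingredient_mixes; infer_instance

def pvWitness_ingredient_mixes : (List (List (List (String × Int)))) :=
  [[[("milk", 1), ("sugar", 2)], [("egg", 1)]], [[("milk", 3)]]]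

def Spec_ingredient_mixes (flat_recipes : List (List (List (String × Int)))) (out : List (List (String × Int))) : Prop := out = ingredient_mixes_alt flat_recipes
instance (flat_recipes : List (List (List (String × Int)))) (out : List (List (String × Int))) : Decidable (Spec_ingredient_mixes flat_recipes out) := by unfold Spec_ingredient_mixes; infer_instance

-- ===== CLAIM (what is proved, stated in full; the proofs are below) =====
def Claim_equal_ingredient_mixes : Prop := ∀ (flat_recipes : List (List (List (String × Int)))), Dom_ingredient_mixes flat_recipes → Pre_ingredient_mixes flat_recipes → Spec_ingredient_mixes flat_recipes (ingredient_mixes flat_recipes)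

-- ===== LEMMAS AND PROOFS =====

-- A's merge step (membership test, insert / +=) equals B's merge step (insert get+v).
lemma stepA_eq_stepB (d : PySem.Dict String Int) (kv : String × Int) :
    (if d.contains kv.1 = false then d.insert kv.1 kv.2
     else d.modify kv.1 0 (· + kv.2)) = d.insert kv.1 (d.getD kv.1 0 + kv.2) := by
  by_cases h : d.contains kv.1 = false
  · rw [if_pos h, PySem.Dict.getD_of_not_contains _ _ h, zero_add]
  · rw [if_neg h]
    rfl

lemma mergeA_eq_mergeB (recipe : List (String × Int)) (d : PySem.Dict String Int) :
    recipe.foldl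
      (fun final kv =>
        if final.contains kv.1 = false then final.insert kv.1 kv.2
        else final.modify kv.1 0 (· + kv.2)) d = pvMergeRecipe d recipe := by
  unfold pvMergeRecipe
  simp only [stepA_eq_stepB]

-- merging a recipe whose keys are fresh and pairwise distinct just appends it
lemma mergeB_fresh (recipe : List (String × Int)) (d : PySem.Dict String Int)
    (hnd : (recipe.map Prod.fst).Nodup)
    (hfresh : ∀ kv ∈ recipe, d.contains kv.1 = false) :
    pvMergeRecipe d recipe = PySem.Dict.mk (d.items ++ recipe) := by
  induction recipe generalizing d with
  | nil => simp [pvMergeRecipe]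
  | cons kv t ih =>
      have hk : d.contains kv.1 = false := hfresh kv (by simp)
      have h0 : d.getD kv.1 0 = 0 := PySem.Dict.getD_of_not_contains _ _ hk
      simp only [pvMergeRecipe, List.foldl_cons] at *
      rw [h0, zero_add]
      have hnd' : (t.map Prod.fst).Nodup := (List.nodup_cons.mp hnd).2
      have hne : kv.1 ∉ t.map Prod.fst := (List.nodup_cons.mp hnd).1
      rw [ih (d.insert kv.1 kv.2) hnd' ?_]
      · rw [PySem.Dict.items_insert_of_not_contains _ _ hk]
        simp
      · intro p hp
        have hpk : p.1 ≠ kv.1 := by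
          intro h; exact hne (h ▸ List.mem_map_of_mem hp)
        rw [PySem.Dict.contains_insert]
        simp [hpk, hfresh p (List.mem_cons_of_mem _ hp)]

lemma nodup_keys_mergeB (d : PySem.Dict String Int) (recipe : List (String × Int))
    (h : d.keys.Nodup) : (pvMergeRecipe d recipe).keys.Nodup :=
  PySem.Dict.nodup_keys_foldl_insert_key recipe Prod.fst
    (fun merged kv => merged.getD kv.1 0 + kv.2) d h

lemma nodup_keys_M (c : List (List (String × Int))) :
    (c.foldl pvMergeRecipe PySem.Dict.empty).keys.Nodup := by
  induction c using List.reverseRecOn with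
  | nil => exact PySem.Dict.nodup_keys_empty
  | append_singleton c r ih =>
      rw [List.foldl_append, List.foldl_cons, List.foldl_nil]
      exact nodup_keys_mergeB _ _ ih

-- re-merging a well-formed dict's items from empty reproduces the dict
lemma mergeB_items (d : PySem.Dict String Int) (h : d.keys.Nodup) :
    pvMergeRecipe PySem.Dict.empty d.items = d := by
  rw [mergeB_fresh d.items PySem.Dict.empty h (fun kv _ => PySem.Dict.contains_empty kv.1)]
  cases d; rfl

-- one unfolding of B's product
lemma pvCombos_cons (x : List (List (String × Int))) (rest : List (List (List (String × Int)))) :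
    pvCombos (x :: rest) =
      (pvCombos rest).flatMap (fun combo => x.map (fun recipe => combo ++ [recipe])) := by
  unfold pvCombos
  rw [List.reverse_cons, List.foldl_append, List.foldl_cons, List.foldl_nil]

-- main invariant: A's recursion produces exactly B's merged products, on nonempty input
lemma mix_eq_map_combos (rest : List (List (List (String × Int)))) (x : List (List (String × Int)))
    (h : ∀ l ∈ x :: rest, ∀ r ∈ l, (r.map Prod.fst).Nodup) :
    ingredient_mixes (x :: rest) =
      (pvCombos (x :: rest)).map
        (fun combo => (combo.foldl pvMergeRecipe PySem.Dict.empty).items) := by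
  induction rest generalizing x with
  | nil =>
      rw [pvCombos_cons]
      show x = _
      simp only [pvCombos, List.reverse_nil, List.foldl_nil, List.flatMap_cons,
        List.flatMap_nil, List.append_nil, List.map_map]
      rw [List.map_congr_left
        (g := fun r => r)
        (fun r hr => by
          have hnd : (r.map Prod.fst).Nodup := h x (by simp) r hr
          show ((pvMergeRecipe PySem.Dict.empty r).items) = r
          rw [mergeB_fresh r PySem.Dict.empty hnd (fun kv _ => PySem.Dict.contains_empty kv.1)]
          rfl)]
      simp
  | cons y t ih =>
      have hrest : ∀ l ∈ y :: t, ∀ r ∈ l, (r.map Prod.fst).Nodup :=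
        fun l hl => h l (List.mem_cons_of_mem _ hl)
      have hih := ih y hrest
      show (ingredient_mixes (y :: t)).foldl
          (fun final option =>
            x.foldl (fun final ingredient => final ++ [make_grocery_list [option, ingredient]]) final)
          [] = _
      -- turn A's append-folds into flatMap/map
      have hshape : ∀ (ps : List (List (String × Int))) (acc : List (List (String × Int))),
          ps.foldl
            (fun final option =>
              x.foldl (fun final ingredient => final ++ [make_grocery_list [option, ingredient]]) final)
            acc
          = acc ++ ps.flatMap (fun option => x.map (fun ing => make_grocery_list [option, ing])) := by
        intro ps
        induction ps with
        | nil => simp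
        | cons p pt ihp =>
            intro acc
            rw [List.foldl_cons, ihp, PySem.List.foldl_append_singleton_eq_map]
            simp [List.append_assoc]
      rw [hshape, List.nil_append, hih, pvCombos_cons x (y :: t)]
      simp only [List.flatMap_map, List.map_flatMap, Function.comp_def, List.map_map]
      apply List.flatMap_congr
      intro c hc
      apply List.map_congr_left
      intro ing _
      -- make_grocery_list [items of M c, ing] = items of (M (c ++ [ing]))
      show make_grocery_list [(c.foldl pvMergeRecipe PySem.Dict.empty).items, ing] = _
      unfold make_grocery_list
      simp only [List.foldl_cons, List.foldl_nil, List.foldl_append, mergeA_eq_mergeB]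
      rw [mergeB_items _ (nodup_keys_M c)]

-- ===== VERDICT (by name: the statement is the Claim_ definition above) =====
theorem ingredient_mixes_spec : Claim_equal_ingredient_mixes := by
  intro fr _ hpre
  obtain ⟨hne, hnd⟩ := hpre
  cases fr with
  | nil => exact absurd rfl hne
  | cons x rest =>
      show ingredient_mixes (x :: rest) = ingredient_mixes_alt (x :: rest)
      rw [mix_eq_map_combos rest x hnd]
      rfl
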